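-- pv_equiv track=rewrite | github.com/jjakimoto/finance_ml | finance_ml/features/entropy.py | lempel_zib_lib
-- ===== SOURCE A (Python) =====
-- def lempel_zib_lib(data):
--     """Calculate Lampel Ziv dictionary
--
--     Params
--     ------
--     data: list
--
--     Returns
--     -------
--     dict
--     """
--     i = 1
--     lib = [str(data[0])]
--     while i < len(data):
--         for j in range(i, len(data)):
--             x = '_'.join([str(data_i) for data_i in data[i:j + 1]])
--             if x not in lib:
--                 lib.append(x)
--                 break
--         i = j + 1
--     return lib
-- ===== SOURCE B (Python) =====
-- def lempel_zib_lib(data):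
--     """Calculate Lampel Ziv dictionary via a flat hash-trie over tokens.
--
--     The set of phrases A maintains is prefix-closed, so it is exactly the node
--     set of a token trie; each outer step walks the trie from the root and adds
--     one fresh node, instead of re-joining and scanning the phrase list.
--     """
--     toks = [str(x) for x in data]
--     child = {}            # (node_id, token) -> node_id; node 0 is the root
--     child[(0, toks[0])] = 1
--     nodes = 2
--     lib = [toks[0]]
--     i, n = 1, len(toks)
--     while i < n:
--         node, j = 0, i
--         while j < n and (node, toks[j]) in child:
--             node = child[(node, toks[j])]
--             j += 1
--         if j == n:
--             break
--         child[(node, toks[j])] = nodes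
--         nodes += 1
--         lib.append('_'.join(toks[i:j + 1]))
--         i = j + 1
--     return lib
-- ===== Notes on version B (the rewrite author's own statement) =====
-- stated objective: faster
-- what changed: B exploits that A's phrase list is prefix-closed and replaces it by a token trie stored as a flat dict (node_id, token) -> node_id: each outer step is one root-to-leaf trie walk with O(1) per-token lookups plus one fresh node, instead of A's re-joining every candidate slice and linearly scanning the whole phrase list for it.
import Mathlib
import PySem

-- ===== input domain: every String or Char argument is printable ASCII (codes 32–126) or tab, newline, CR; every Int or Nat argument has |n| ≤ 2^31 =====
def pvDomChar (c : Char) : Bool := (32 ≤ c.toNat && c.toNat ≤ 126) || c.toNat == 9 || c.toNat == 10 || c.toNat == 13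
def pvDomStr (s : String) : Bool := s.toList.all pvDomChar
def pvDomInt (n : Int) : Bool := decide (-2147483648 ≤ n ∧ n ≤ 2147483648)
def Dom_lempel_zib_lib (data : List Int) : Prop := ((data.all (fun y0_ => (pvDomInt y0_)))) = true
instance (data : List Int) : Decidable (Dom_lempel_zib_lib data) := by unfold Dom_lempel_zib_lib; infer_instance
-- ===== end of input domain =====

-- B replaces A's list of joined phrase strings (re-joined and linearly scanned for every
-- candidate extension) by a token trie stored as a flat map (node_id, token) -> node_id:
-- A's phrase set is prefix-closed, so it is exactly the trie's node set, and each outer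
-- step is one root-to-leaf walk plus one fresh node (objective: faster).
-- Loops are ported as structural recursion on a fuel of data.length (a pure totality guard:
-- each loop advances its index by at least 1 per step, so the fuel never runs out).

-- ===== PORT A =====
-- x = '_'.join([str(data_i) for data_i in data[i:j+1]])
def joinSegA (data : List Int) (i j : Nat) : String :=
  PySem.Str.join "_" ((PySem.List.slice data (some (i : Int)) (some ((j : Int) + 1))).map PySem.Int.toStr)

-- the inner 'for j in range(i, len(data))' loop: returns (lib, j) after break / fall-through
def forA (data : List Int) (lib : List String) (i : Nat) : Nat → Nat → List String × Nat
  | 0, _ => (lib, data.length - 1)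
  | fuel + 1, j =>
    if j < data.length then
      let x := joinSegA data i j
      if x ∈ lib then forA data lib i fuel (j + 1) else (lib ++ [x], j)
    else (lib, data.length - 1)

-- the outer 'while i < len(data)' loop
def whileA (data : List Int) : Nat → List String → Nat → List String
  | 0, lib, _ => lib
  | fuel + 1, lib, i =>
    if i < data.length then
      whileA data fuel (forA data lib i data.length i).1 ((forA data lib i data.length i).2 + 1)
    else lib

def lempel_zib_lib (data : List Int) : List String :=
  whileA data data.length [PySem.Int.toStr (PySem.List.pyGetD data 0 0)] 1

-- ===== PORT B =====
-- the inner 'while j < n and (node, toks[j]) in child' walk of Source B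
def walkB (toks : List String) (child : PySem.Dict (Nat × String) Nat) : Nat → Nat → Nat → Nat × Nat
  | 0, node, j => (node, j)
  | fuel + 1, node, j =>
    if j < toks.length ∧ child.contains (node, toks.getD j "") = true then
      walkB toks child fuel ((child.get? (node, toks.getD j "")).getD 0) (j + 1)
    else (node, j)

-- the outer 'while i < n' loop of Source B
def whileB (toks : List String) : Nat → PySem.Dict (Nat × String) Nat → Nat → List String → Nat → List String
  | 0, _, _, lib, _ => lib
  | fuel + 1, child, nodes, lib, i =>
    if i < toks.length then
      let r := walkB toks child toks.length 0 i
      if r.2 = toks.length then lib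
      else whileB toks fuel (child.insert (r.1, toks.getD r.2 "") nodes) (nodes + 1)
             (lib ++ [PySem.Str.join "_" (PySem.List.slice toks (some (i : Int)) (some ((r.2 : Int) + 1)))]) (r.2 + 1)
    else lib

def lempel_zib_lib_alt (data : List Int) : List String :=
  let toks := data.map PySem.Int.toStr
  let first := PySem.List.pyGetD toks 0 ""
  whileB toks toks.length ((PySem.Dict.empty).insert (0, first) 1) 2 [first] 1

-- ===== PRECONDITION & SPEC =====
-- Pre_ excludes only the empty list, on which Python A (and B) raise IndexError reading the first element.
def Pre_lempel_zib_lib (data : List Int) : Prop := data ≠ []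
instance (data : List Int) : Decidable (Pre_lempel_zib_lib data) := by unfold Pre_lempel_zib_lib; infer_instance
def pvWitness_lempel_zib_lib : List Int := ([1, 2, 1, 2, 1])

def Spec_lempel_zib_lib (data : List Int) (out : List String) : Prop := out = lempel_zib_lib_alt data
instance (data : List Int) (out : List String) : Decidable (Spec_lempel_zib_lib data out) := by unfold Spec_lempel_zib_lib; infer_instance

-- ===== CLAIM (what is proved, stated in full; the proofs are below) =====
def Claim_equal_lempel_zib_lib : Prop := ∀ (data : List Int), Dom_lempel_zib_lib data → Pre_lempel_zib_lib data → Spec_lempel_zib_lib data (lempel_zib_lib data)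

-- ===== LEMMAS AND PROOFS =====

-- -------- tokens and segments --------
def tokP (data : List Int) (k : Nat) : String := PySem.Int.toStr (data.getD k 0)

-- data[i:j] as a token list (exclusive right end)
def segC (data : List Int) (i j : Nat) : List String :=
  (PySem.List.slice data (some (i : Int)) (some (j : Int))).map PySem.Int.toStr

theorem segC_self (data : List Int) (i : Nat) : segC data i i = [] := by
  simp [segC, PySem.List.slice_natCast]

theorem segC_snoc (data : List Int) (i m : Nat) (him : i ≤ m) (hm : m < data.length) :
    segC data i (m + 1) = segC data i m ++ [tokP data m] := by
  unfold segC tokP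
  have h1 : ((m + 1 : Nat) : Int) = ((m : Nat) : Int) + 1 := by push_cast; ring
  rw [h1]
  have h2 : ((m : Int) + 1) = ((m + 1 : Nat) : Int) := by push_cast; ring
  rw [h2, PySem.List.slice_natCast, PySem.List.slice_natCast]
  have hm1 : m + 1 - i = (m - i) + 1 := by omega
  rw [hm1, List.take_add_one, List.map_append]
  congr 1
  have hlt : m - i < (data.drop i).length := by rw [List.length_drop]; omega
  rw [List.getElem?_drop]
  have hie : i + (m - i) = m := by omega
  rw [hie, List.getElem?_eq_getElem hm]
  simp [List.getD_eq_getElem?_getD, List.getElem?_eq_getElem hm]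

theorem segC_ne_nil (data : List Int) (i j : Nat) (hij : i < j) (hj : j ≤ data.length) :
    segC data i j ≠ [] := by
  unfold segC
  rw [PySem.List.slice_natCast]
  intro h
  have := congrArg List.length h
  simp only [List.length_map, List.length_take, List.length_drop, List.length_nil] at this
  omega

theorem joinSegA_eq_segC (data : List Int) (i j : Nat) :
    joinSegA data i j = PySem.Str.join "_" (segC data i (j + 1)) := by
  unfold joinSegA segC
  have h : ((j + 1 : Nat) : Int) = ((j : Nat) : Int) + 1 := by push_cast; ring
  rw [h]

-- -------- tokens contain no '_' --------
theorem digitChar_ne_underscore (m : Nat) : Nat.digitChar m ≠ '_' := by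
  rcases Nat.lt_or_ge m 16 with hm | hm
  · interval_cases m <;> decide
  · have h : Nat.digitChar m = '*' := by
      unfold Nat.digitChar
      repeat rw [if_neg (by omega)]
    rw [h]; decide

theorem toDigitsCore_ne_underscore :
    ∀ (fuel n : Nat) (ds : List Char), (∀ c ∈ ds, c ≠ '_') →
      ∀ c ∈ Nat.toDigitsCore 10 fuel n ds, c ≠ '_' := by
  intro fuel
  induction fuel with
  | zero => intro n ds hds c hc; exact hds c hc
  | succ fuel ih =>
    intro n ds hds c hc
    rw [Nat.toDigitsCore] at hc
    by_cases h : n / 10 = 0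
    · simp only [h] at hc
      rcases List.mem_cons.mp hc with rfl | hmem
      · exact digitChar_ne_underscore _
      · exact hds c hmem
    · simp only [if_neg h] at hc
      refine ih (n / 10) _ ?_ c hc
      intro c' hc'
      rcases List.mem_cons.mp hc' with rfl | hmem
      · exact digitChar_ne_underscore _
      · exact hds c' hmem

theorem toStr_no_underscore (v : Int) : '_' ∉ (PySem.Int.toStr v).toList := by
  rw [PySem.Int.toList_toStr]
  unfold PySem.Int.toChars Nat.toDigits
  intro hmem
  by_cases h : v < 0
  · simp only [if_pos h] at hmem
    rcases List.mem_cons.mp hmem with h' | h'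
    · exact absurd h'.symm (by decide)
    · exact toDigitsCore_ne_underscore _ _ [] (by simp) '_' h' rfl
  · simp only [if_neg h] at hmem
    exact toDigitsCore_ne_underscore _ _ [] (by simp) '_' hmem rfl

theorem segC_no_underscore (data : List Int) (i j : Nat) :
    ∀ s ∈ segC data i j, '_' ∉ s.toList := by
  intro s hs
  unfold segC at hs
  rcases List.mem_map.mp hs with ⟨v, _, rfl⟩
  exact toStr_no_underscore v

-- -------- '_'-join is injective on '_'-free token lists --------
theorem sep_split (l₁ : List Char) :
    ∀ (l₂ r₁ r₂ : List Char), '_' ∉ l₁ → '_' ∉ l₂ →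
      l₁ ++ '_' :: r₁ = l₂ ++ '_' :: r₂ → l₁ = l₂ ∧ r₁ = r₂ := by
  induction l₁ with
  | nil =>
    intro l₂ r₁ r₂ _ h₂ h
    cases l₂ with
    | nil => simpa using h
    | cons c l₂' =>
      simp only [List.nil_append, List.cons_append, List.cons.injEq] at h
      exact absurd (List.mem_cons.mpr (Or.inl h.1)) h₂
  | cons c l₁' ih =>
    intro l₂ r₁ r₂ h₁ h₂ h
    cases l₂ with
    | nil =>
      simp only [List.cons_append, List.nil_append, List.cons.injEq] at h
      exact absurd (h.1 ▸ List.mem_cons.mpr (Or.inl rfl)) h₁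
    | cons c₂ l₂' =>
      simp only [List.cons_append, List.cons.injEq] at h
      obtain ⟨rfl, h'⟩ := h
      have := ih l₂' r₁ r₂ (fun hm => h₁ (List.mem_cons.mpr (Or.inr hm)))
        (fun hm => h₂ (List.mem_cons.mpr (Or.inr hm))) h'
      exact ⟨by rw [this.1], this.2⟩

theorem joinC_inj :
    ∀ (ts ts' : List (List Char)), ts ≠ [] → ts' ≠ [] →
      (∀ l ∈ ts, '_' ∉ l) → (∀ l ∈ ts', '_' ∉ l) →
      PySem.Chars.join ['_'] ts = PySem.Chars.join ['_'] ts' → ts = ts' := by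
  intro ts
  induction ts with
  | nil => intro ts' h; exact absurd rfl h
  | cons a ts ih =>
    intro ts' _ hne' hfree hfree' h
    cases ts' with
    | nil => exact absurd rfl hne'
    | cons b ts₂' =>
      cases ts with
      | nil =>
        cases ts₂' with
        | nil =>
          rw [PySem.Chars.join_singleton, PySem.Chars.join_singleton] at h
          rw [h]
        | cons c' ts₃' =>
          rw [PySem.Chars.join_singleton, PySem.Chars.join_cons_cons] at h
          exfalso
          apply hfree a (List.mem_cons.mpr (Or.inl rfl))
          rw [h]
          simp
      | cons c ts₂ =>
        cases ts₂' with
        | nil =>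
          rw [PySem.Chars.join_singleton, PySem.Chars.join_cons_cons] at h
          exfalso
          apply hfree' b (List.mem_cons.mpr (Or.inl rfl))
          rw [← h]
          simp
        | cons c' ts₃' =>
          rw [PySem.Chars.join_cons_cons, PySem.Chars.join_cons_cons] at h
          have h' : a ++ '_' :: PySem.Chars.join ['_'] (c :: ts₂)
              = b ++ '_' :: PySem.Chars.join ['_'] (c' :: ts₃') := by
            simpa [List.append_assoc] using h
          obtain ⟨hab, hrest⟩ := sep_split a b _ _
            (hfree a (List.mem_cons.mpr (Or.inl rfl)))
            (hfree' b (List.mem_cons.mpr (Or.inl rfl))) h'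
          have := ih (c' :: ts₃') (by simp) (by simp)
            (fun l hl => hfree l (List.mem_cons.mpr (Or.inr hl)))
            (fun l hl => hfree' l (List.mem_cons.mpr (Or.inr hl))) hrest
          rw [hab, this]

theorem strJoin_inj (ts ts' : List String) (hne : ts ≠ []) (hne' : ts' ≠ [])
    (hfree : ∀ s ∈ ts, '_' ∉ s.toList) (hfree' : ∀ s ∈ ts', '_' ∉ s.toList)
    (h : PySem.Str.join "_" ts = PySem.Str.join "_" ts') : ts = ts' := by
  have hl : PySem.Chars.join "_".toList (ts.map String.toList)
      = PySem.Chars.join "_".toList (ts'.map String.toList) := by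
    rw [← PySem.Str.toList_join, ← PySem.Str.toList_join, h]
  have hsep : "_".toList = ['_'] := rfl
  rw [hsep] at hl
  have hmap : ts.map String.toList = ts'.map String.toList := by
    apply joinC_inj _ _ (by simpa using hne) (by simpa using hne')
    · intro l hl'
      rcases List.mem_map.mp hl' with ⟨s, hs, rfl⟩
      exact hfree s hs
    · intro l hl'
      rcases List.mem_map.mp hl' with ⟨s, hs, rfl⟩
      exact hfree' s hs
    · exact hl
  exact List.map_injective_iff.mpr (fun a b hab => String.toList_inj.mp hab) hmap

theorem strJoin_singleton (s : String) : PySem.Str.join "_" [s] = s := by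
  apply String.toList_inj.mp
  rw [PySem.Str.toList_join]
  simp [PySem.Chars.join_singleton]

-- -------- the abstract trie walk and its theory --------
def walkT (d : PySem.Dict (Nat × String) Nat) : Nat → List String → Option Nat
  | u, [] => some u
  | u, t :: ts =>
    match d.get? (u, t) with
    | some v => walkT d v ts
    | none => none

-- freshness/tree invariant for (child, nodes)
def Good (d : PySem.Dict (Nat × String) Nat) (nodes : Nat) : Prop :=
  1 ≤ nodes ∧
  (∀ u t v, d.get? (u, t) = some v → u < nodes ∧ 0 < v ∧ v < nodes) ∧
  (∀ u t u' t' v, d.get? (u, t) = some v → d.get? (u', t') = some v → u = u' ∧ t = t')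

-- the bridging invariant: walkable token lists are exactly the phrases of lib
def Main (d : PySem.Dict (Nat × String) Nat) (lib : List String) : Prop :=
  ∀ ts : List String, ts ≠ [] → (∀ s ∈ ts, '_' ∉ s.toList) →
    ((∃ w, walkT d 0 ts = some w) ↔ PySem.Str.join "_" ts ∈ lib)

theorem walkT_append (d : PySem.Dict (Nat × String) Nat) (t : String) :
    ∀ (ts : List String) (u : Nat),
      walkT d u (ts ++ [t]) = (walkT d u ts).bind (fun a => d.get? (a, t)) := by
  intro ts
  induction ts with
  | nil =>
    intro u
    simp only [List.nil_append]
    cases h : d.get? (u, t) <;> simp [walkT, h]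
  | cons s ts ih =>
    intro u
    simp only [List.cons_append, walkT]
    cases d.get? (u, s) <;> simp [ih]

theorem walkT_lt (d : PySem.Dict (Nat × String) Nat) (nodes : Nat) (hG : Good d nodes)
    (ts : List String) (w : Nat) (h : walkT d 0 ts = some w) : w < nodes := by
  rcases List.eq_nil_or_concat ts with rfl | ⟨q, t, rfl⟩
  · simp only [walkT, Option.some.injEq] at h
    have h1 := hG.1
    omega
  · rw [List.concat_eq_append, walkT_append] at h
    cases hq : walkT d 0 q with
    | none => rw [hq] at h; simp at h
    | some a =>
      rw [hq] at h
      simp only [Option.bind_some] at h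
      exact (hG.2.1 a t w h).2.2

theorem walkT_inj (d : PySem.Dict (Nat × String) Nat) (nodes : Nat) (hG : Good d nodes) :
    ∀ (p q : List String) (w : Nat), walkT d 0 p = some w → walkT d 0 q = some w → p = q := by
  intro p
  induction p using List.reverseRecOn with
  | nil =>
    intro q w hp hq
    simp only [walkT, Option.some.injEq] at hp
    rcases List.eq_nil_or_concat q with rfl | ⟨q', t, rfl⟩
    · rfl
    · rw [List.concat_eq_append, walkT_append] at hq
      cases hq' : walkT d 0 q' with
      | none => rw [hq'] at hq; simp at hq
      | some a =>
        rw [hq'] at hq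
        simp only [Option.bind_some] at hq
        have := (hG.2.1 a t w hq).2.1
        omega
  | append_singleton p' t ih =>
    intro q w hp hq
    rw [walkT_append] at hp
    cases hp' : walkT d 0 p' with
    | none => rw [hp'] at hp; simp at hp
    | some a =>
      rw [hp'] at hp
      simp only [Option.bind_some] at hp
      rcases List.eq_nil_or_concat q with rfl | ⟨q', t', rfl⟩
      · simp only [walkT, Option.some.injEq] at hq
        have := (hG.2.1 a t w hp).2.1
        omega
      · rw [List.concat_eq_append, walkT_append] at hq
        cases hq' : walkT d 0 q' with
        | none => rw [hq'] at hq; simp at hq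
        | some a' =>
          rw [hq'] at hq
          simp only [Option.bind_some] at hq
          obtain ⟨rfl, rfl⟩ := hG.2.2 a t a' t' w hp hq
          rw [List.concat_eq_append, ih q' a hp' hq']

theorem walkT_mono (d : PySem.Dict (Nat × String) Nat) (node : Nat) (t : String) (nodes : Nat)
    (hnone : d.get? (node, t) = none) :
    ∀ (ts : List String) (u w : Nat), walkT d u ts = some w →
      walkT (d.insert (node, t) nodes) u ts = some w := by
  intro ts
  induction ts with
  | nil => intro u w h; exact h
  | cons s ts ih =>
    intro u w h
    simp only [walkT] at h ⊢
    cases hg : d.get? (u, s) with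
    | none => rw [hg] at h; simp at h
    | some v =>
      rw [hg] at h
      have hne : (u, s) ≠ (node, t) := by
        intro he
        rw [he, hnone] at hg
        simp at hg
      rw [PySem.Dict.get?_insert, if_neg hne, hg]
      exact ih v w h

theorem good_insert (d : PySem.Dict (Nat × String) Nat) (nodes node : Nat) (t : String)
    (hG : Good d nodes) (hnode : node < nodes) :
    Good (d.insert (node, t) nodes) (nodes + 1) := by
  refine ⟨by omega, ?_, ?_⟩
  · intro u t' v h
    rw [PySem.Dict.get?_insert] at h
    by_cases he : (u, t') = (node, t)
    · rw [if_pos he] at h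
      obtain ⟨rfl, rfl⟩ := Prod.mk.injEq .. ▸ he
      simp only [Option.some.injEq] at h
      omega
    · rw [if_neg he] at h
      have := hG.2.1 u t' v h
      omega
  · intro u t' u' t'' v h1 h2
    rw [PySem.Dict.get?_insert] at h1 h2
    by_cases he1 : (u, t') = (node, t) <;> by_cases he2 : (u', t'') = (node, t)
    · obtain ⟨rfl, rfl⟩ := Prod.mk.injEq .. ▸ he1
      obtain ⟨rfl, rfl⟩ := Prod.mk.injEq .. ▸ he2
      exact ⟨rfl, rfl⟩
    · rw [if_pos he1] at h1
      rw [if_neg he2] at h2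
      simp only [Option.some.injEq] at h1
      have := (hG.2.1 u' t'' v h2).2.2
      omega
    · rw [if_neg he1] at h1
      rw [if_pos he2] at h2
      simp only [Option.some.injEq] at h2
      have := (hG.2.1 u t' v h1).2.2
      omega
    · rw [if_neg he1] at h1
      rw [if_neg he2] at h2
      exact hG.2.2 u t' u' t'' v h1 h2

theorem walkT_insert (d : PySem.Dict (Nat × String) Nat) (nodes node : Nat) (t : String)
    (hG : Good d nodes) (hnone : d.get? (node, t) = none) (hnode : node < nodes) :
    ∀ (ts : List String) (w : Nat),
      walkT (d.insert (node, t) nodes) 0 ts = some w ↔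
        (walkT d 0 ts = some w ∨
          (w = nodes ∧ ∃ p, ts = p ++ [t] ∧ walkT d 0 p = some node)) := by
  intro ts
  induction ts using List.reverseRecOn with
  | nil =>
    intro w
    simp only [walkT, Option.some.injEq]
    constructor
    · intro h; exact Or.inl h
    · rintro (h | ⟨hw, p, hp, _⟩)
      · exact h
      · exact absurd hp (by simp)
  | append_singleton q t' ih =>
    intro w
    rw [walkT_append, walkT_append]
    constructor
    · intro h
      cases hq : walkT (d.insert (node, t) nodes) 0 q with
      | none => rw [hq] at h; simp at h
      | some a =>
        rw [hq] at h
        simp only [Option.bind_some] at h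
        rcases (ih a).mp hq with hqa | ⟨ha, p, hq2, hp⟩
        · by_cases he : (a, t') = (node, t)
          · rw [PySem.Dict.get?_insert, if_pos he] at h
            have ha : a = node := (Prod.mk.injEq .. ▸ he).1
            have ht' : t' = t := (Prod.mk.injEq .. ▸ he).2
            simp only [Option.some.injEq] at h
            refine Or.inr ⟨h.symm, q, ?_, ?_⟩
            · rw [ht']
            · rw [← ha]; exact hqa
          · rw [PySem.Dict.get?_insert, if_neg he] at h
            exact Or.inl (by rw [hqa]; simpa using h)
        · -- walking out of the fresh node: impossible
          exfalso
          rw [ha] at h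
          have hne : ((nodes, t') : Nat × String) ≠ (node, t) := by
            intro he
            have := (Prod.mk.injEq .. ▸ he).1
            omega
          rw [PySem.Dict.get?_insert, if_neg hne] at h
          have := (hG.2.1 nodes t' w h).1
          omega
    · rintro (h | ⟨hw, p, hp, hwp⟩)
      · cases hq : walkT d 0 q with
        | none => rw [hq] at h; simp at h
        | some a =>
          rw [hq] at h
          simp only [Option.bind_some] at h
          have hne : ((a, t') : Nat × String) ≠ (node, t) := by
            intro he
            rw [he, hnone] at h
            simp at h
          rw [walkT_mono d node t nodes hnone q 0 a hq]
          simp only [Option.bind_some]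
          rw [PySem.Dict.get?_insert, if_neg hne]
          exact h
      · -- ts = p ++ [t]: q ++ [t'] = p ++ [t]
        have hqp : q = p := by
          have h1 := congrArg (fun l => l.dropLast) hp
          simpa using h1
        have ht' : t' = t := by
          have h2 := congrArg (fun l => l.getLast?) hp
          simpa using h2
        rw [hqp, ht', hw]
        rw [walkT_mono d node t nodes hnone p 0 node hwp]
        simp only [Option.bind_some]
        rw [PySem.Dict.get?_insert, if_pos rfl]

theorem main_preserve (d : PySem.Dict (Nat × String) Nat) (nodes node : Nat) (lib : List String)
    (p₀ : List String) (t : String)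
    (hG : Good d nodes) (hM : Main d lib)
    (hwp : walkT d 0 p₀ = some node) (hnone : d.get? (node, t) = none) (hnode : node < nodes)
    (hfree : ∀ s ∈ p₀ ++ [t], '_' ∉ s.toList) :
    Main (d.insert (node, t) nodes) (lib ++ [PySem.Str.join "_" (p₀ ++ [t])]) := by
  intro ts hne hfree'
  rw [List.mem_append, List.mem_singleton]
  constructor
  · rintro ⟨w, hw⟩
    rcases (walkT_insert d nodes node t hG hnone hnode ts w).mp hw with h | ⟨_, p, rfl, hp⟩
    · exact Or.inl ((hM ts hne hfree').mp ⟨w, h⟩)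
    · have := walkT_inj d nodes hG p p₀ node hp hwp
      rw [this]
      exact Or.inr rfl
  · rintro (h | h)
    · obtain ⟨w, hw⟩ := (hM ts hne hfree').mpr h
      exact ⟨w, (walkT_insert d nodes node t hG hnone hnode ts w).mpr (Or.inl hw)⟩
    · have hts : ts = p₀ ++ [t] :=
        strJoin_inj ts (p₀ ++ [t]) hne (by simp) hfree' hfree h
      refine ⟨nodes, (walkT_insert d nodes node t hG hnone hnode ts nodes).mpr ?_⟩
      exact Or.inr ⟨rfl, p₀, hts, hwp⟩

-- -------- A-side: first new phrase index (as in the original proof of A) --------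
def findJ (data : List Int) (lib : List String) (i : Nat) : Nat → Nat → Option Nat
  | 0, _ => none
  | fuel + 1, j =>
    if j < data.length then
      if joinSegA data i j ∈ lib then findJ data lib i fuel (j + 1) else some j
    else none

theorem findJ_stop (data : List Int) (lib : List String) (i : Nat) (fuel j : Nat)
    (h : ¬ j < data.length) : findJ data lib i fuel j = none := by
  cases fuel with
  | zero => rfl
  | succ fuel => simp [findJ, h]

theorem forA_eq (data : List Int) (lib : List String) (i : Nat) :
    ∀ fuel j, data.length - j ≤ fuel →
      forA data lib i fuel j =
        (match findJ data lib i fuel j with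
          | some j' => (lib ++ [joinSegA data i j'], j')
          | none => (lib, data.length - 1)) := by
  intro fuel
  induction fuel with
  | zero => intro j hk; simp [forA, findJ]
  | succ fuel ih =>
    intro j hk
    by_cases hj : j < data.length
    · simp only [forA, findJ, if_pos hj]
      by_cases hm : joinSegA data i j ∈ lib
      · simp only [if_pos hm]
        exact ih (j + 1) (by omega)
      · simp only [if_neg hm]
    · simp [forA, findJ, hj]

theorem findJ_some (data : List Int) (lib : List String) (i : Nat) :
    ∀ fuel j j', findJ data lib i fuel j = some j' →
      j ≤ j' ∧ j' < data.length ∧ joinSegA data i j' ∉ lib := by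
  intro fuel
  induction fuel with
  | zero => intro j j' h; simp [findJ] at h
  | succ fuel ih =>
    intro j j' h
    rw [findJ] at h
    by_cases hj : j < data.length
    · simp only [if_pos hj] at h
      by_cases hm : joinSegA data i j ∈ lib
      · simp only [if_pos hm] at h
        have := ih (j + 1) j' h
        exact ⟨by omega, this.2⟩
      · simp only [if_neg hm, Option.some.injEq] at h
        subst h
        exact ⟨le_refl _, hj, hm⟩
    · simp [hj] at h

-- -------- the inner-loop bridge: B's trie walk finds A's first new phrase --------
theorem getD_map_toStr (data : List Int) (j : Nat) (hj : j < data.length) :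
    (data.map PySem.Int.toStr).getD j "" = tokP data j := by
  unfold tokP
  rw [List.getD_eq_getElem?_getD, List.getD_eq_getElem?_getD, List.getElem?_map,
    List.getElem?_eq_getElem hj]
  rfl

theorem walkB_eq (data : List Int) (d : PySem.Dict (Nat × String) Nat) (nodes : Nat)
    (lib : List String) (i : Nat) (_hG : Good d nodes) (hM : Main d lib) :
    ∀ k fB fF (j node : Nat), data.length - j ≤ k → data.length - j ≤ fB → data.length - j ≤ fF →
      i ≤ j → j ≤ data.length →
      walkT d 0 (segC data i j) = some node →
      (match findJ data lib i fF j with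
        | some j' => ∃ node', walkB (data.map PySem.Int.toStr) d fB node j = (node', j') ∧
            walkT d 0 (segC data i j') = some node' ∧ d.get? (node', tokP data j') = none
        | none => (walkB (data.map PySem.Int.toStr) d fB node j).2 = data.length) := by
  intro k
  induction k with
  | zero =>
    intro fB fF j node hk hfB hfF hij hjn hw
    have hj : j = data.length := by omega
    rw [findJ_stop data lib i fF j (by omega)]
    cases fB with
    | zero => simpa [walkB] using hj
    | succ fB =>
      rw [walkB]
      have hcond : ¬ (j < (data.map PySem.Int.toStr).length ∧
          d.contains (node, (data.map PySem.Int.toStr).getD j "") = true) := by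
        rw [List.length_map]
        intro hc; omega
      rw [if_neg hcond]
      simpa using hj
  | succ k ih =>
    intro fB fF j node hk hfB hfF hij hjn hw
    by_cases hj : j < data.length
    · obtain ⟨fB', rfl⟩ : ∃ m, fB = m + 1 := ⟨fB - 1, by omega⟩
      obtain ⟨fF', rfl⟩ : ∃ m, fF = m + 1 := ⟨fF - 1, by omega⟩
      rw [findJ]
      rw [if_pos hj]
      have hsnoc := segC_snoc data i j hij hj
      have hwstep : walkT d 0 (segC data i (j + 1))
          = (d.get? (node, tokP data j)).bind (fun v => walkT d v []) := by
        rw [hsnoc, walkT_append, hw]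
        simp only [Option.bind_some]
        cases d.get? (node, tokP data j) <;> simp [walkT]
      have hmain := hM (segC data i (j + 1))
        (segC_ne_nil data i (j + 1) (by omega) (by omega))
        (segC_no_underscore data i (j + 1))
      rw [← joinSegA_eq_segC] at hmain
      by_cases hm : joinSegA data i j ∈ lib
      · -- phrase known: both advance
        rw [if_pos hm]
        obtain ⟨w, hwj1⟩ := hmain.mpr hm
        have hg : d.get? (node, tokP data j) = some w := by
          rw [hwstep] at hwj1
          cases hgg : d.get? (node, tokP data j) with
          | none => rw [hgg] at hwj1; simp at hwj1
          | some v =>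
            rw [hgg] at hwj1
            simp only [Option.bind_some, walkT, Option.some.injEq] at hwj1
            rw [hwj1]
        rw [walkB]
        have hcond : j < (data.map PySem.Int.toStr).length ∧
            d.contains (node, (data.map PySem.Int.toStr).getD j "") = true := by
          constructor
          · rw [List.length_map]; exact hj
          · rw [getD_map_toStr data j hj, PySem.Dict.contains_eq_isSome_get?, hg]
            rfl
        rw [if_pos hcond, getD_map_toStr data j hj, hg]
        have hwj1' : walkT d 0 (segC data i (j + 1)) = some w := by
          rw [hwstep, hg]; simp [walkT]
        exact ih fB' fF' (j + 1) w (by omega) (by omega) (by omega) (by omega) (by omega) hwj1'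
      · -- first new phrase: walk stops here
        rw [if_neg hm]
        have hg : d.get? (node, tokP data j) = none := by
          cases hgg : d.get? (node, tokP data j) with
          | none => rfl
          | some v =>
            exfalso
            apply hm
            apply hmain.mp
            refine ⟨v, ?_⟩
            rw [hwstep, hgg]
            simp [walkT]
        rw [walkB]
        have hcond : ¬ (j < (data.map PySem.Int.toStr).length ∧
            d.contains (node, (data.map PySem.Int.toStr).getD j "") = true) := by
          rintro ⟨_, hc⟩
          rw [getD_map_toStr data j hj, PySem.Dict.contains_eq_isSome_get?, hg] at hc
          exact Bool.noConfusion hc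
        rw [if_neg hcond]
        exact ⟨node, rfl, hw, hg⟩
    · have hje : j = data.length := by omega
      rw [findJ_stop data lib i fF j hj]
      cases fB with
      | zero => simpa [walkB] using hje
      | succ fB =>
        rw [walkB]
        have hcond : ¬ (j < (data.map PySem.Int.toStr).length ∧
            d.contains (node, (data.map PySem.Int.toStr).getD j "") = true) := by
          rw [List.length_map]
          intro hc; omega
        rw [if_neg hcond]
        simpa using hje

-- -------- outer loops --------
theorem whileA_stop (data : List Int) (fuel : Nat) (lib : List String) (i : Nat)
    (h : ¬ i < data.length) : whileA data fuel lib i = lib := by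
  cases fuel with
  | zero => rfl
  | succ fuel => simp [whileA, h]

theorem whileB_stop (toks : List String) (fuel : Nat) (d : PySem.Dict (Nat × String) Nat)
    (nodes : Nat) (lib : List String) (i : Nat) (h : ¬ i < toks.length) :
    whileB toks fuel d nodes lib i = lib := by
  cases fuel with
  | zero => rfl
  | succ fuel => simp [whileB, h]

theorem slice_map_toStr (data : List Int) (i j : Nat) :
    PySem.List.slice (data.map PySem.Int.toStr) (some (i : Int)) (some ((j : Int) + 1))
      = (PySem.List.slice data (some (i : Int)) (some ((j : Int) + 1))).map PySem.Int.toStr := by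
  have h : ((j : Int) + 1) = ((j + 1 : Nat) : Int) := by push_cast; ring
  rw [h, PySem.List.slice_natCast, PySem.List.slice_natCast, List.map_take, List.map_drop]

theorem main_loop (data : List Int) :
    ∀ k fA fB (d : PySem.Dict (Nat × String) Nat) (nodes : Nat) (lib : List String) (i : Nat),
      data.length - i ≤ k → data.length - i ≤ fA → data.length - i ≤ fB →
      Good d nodes → Main d lib →
      whileA data fA lib i = whileB (data.map PySem.Int.toStr) fB d nodes lib i := by
  intro k
  induction k with
  | zero =>
    intro fA fB d nodes lib i hk _ _ _ _
    have hi : ¬ i < data.length := by omega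
    rw [whileA_stop data fA lib i hi,
      whileB_stop (data.map PySem.Int.toStr) fB d nodes lib i (by rw [List.length_map]; exact hi)]
  | succ k ih =>
    intro fA fB d nodes lib i hk hfA hfB hG hM
    by_cases hi : i < data.length
    · obtain ⟨fA', rfl⟩ : ∃ m, fA = m + 1 := ⟨fA - 1, by omega⟩
      obtain ⟨fB', rfl⟩ : ∃ m, fB = m + 1 := ⟨fB - 1, by omega⟩
      rw [whileA, whileB]
      have hiB : i < (data.map PySem.Int.toStr).length := by rw [List.length_map]; exact hi
      rw [if_pos hi, if_pos hiB]
      rw [forA_eq data lib i data.length i (by omega)]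
      have hwalk0 : walkT d 0 (segC data i i) = some 0 := by rw [segC_self]; rfl
      have hB := walkB_eq data d nodes lib i hG hM data.length
        (data.map PySem.Int.toStr).length data.length i 0 (by omega)
        (by rw [List.length_map]; omega) (by omega) (le_refl i) (by omega) hwalk0
      cases hf : findJ data lib i data.length i with
      | some j' =>
        rw [hf] at hB
        obtain ⟨node', hwB, hwalk, hnone⟩ := hB
        obtain ⟨hij', hj'n, _⟩ := findJ_some data lib i data.length i j' hf
        simp only [hwB]
        have hne : ¬ j' = (data.map PySem.Int.toStr).length := by
          rw [List.length_map]; omega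
        rw [if_neg hne]
        have hnode' : node' < nodes := walkT_lt d nodes hG _ _ hwalk
        have htok : (data.map PySem.Int.toStr).getD j' "" = tokP data j' :=
          getD_map_toStr data j' hj'n
        have hjoin : PySem.Str.join "_"
            (PySem.List.slice (data.map PySem.Int.toStr) (some (i : Int)) (some ((j' : Int) + 1)))
            = joinSegA data i j' := by
          rw [slice_map_toStr]; rfl
        rw [htok, hjoin]
        apply ih fA' fB' (d.insert (node', tokP data j') nodes) (nodes + 1)
          (lib ++ [joinSegA data i j']) (j' + 1) (by omega) (by omega) (by omega)
        · exact good_insert d nodes node' (tokP data j') hG hnode'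
        · have hp := main_preserve d nodes node' lib (segC data i j') (tokP data j')
            hG hM hwalk hnone hnode' ?_
          · rw [← segC_snoc data i j' hij' hj'n] at hp
            rw [← joinSegA_eq_segC] at hp
            exact hp
          · rw [← segC_snoc data i j' hij' hj'n]
            exact segC_no_underscore data i (j' + 1)
      | none =>
        rw [hf] at hB
        simp only
        rw [if_pos (by rw [List.length_map] at hB ⊢; exact hB)]
        exact whileA_stop data fA' lib (data.length - 1 + 1) (by omega)
    · rw [whileA_stop data _ lib i hi,
        whileB_stop (data.map PySem.Int.toStr) _ d nodes lib i (by rw [List.length_map]; exact hi)]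

-- -------- initial state --------
theorem get?_init (t0 : String) (u : Nat) (t : String) :
    ((PySem.Dict.empty).insert ((0 : Nat), t0) 1).get? (u, t)
      = if (u, t) = (0, t0) then some 1 else none := by
  rw [PySem.Dict.get?_insert]
  split_ifs with h
  · rfl
  · exact PySem.Dict.get?_empty _

theorem good_init (t0 : String) : Good ((PySem.Dict.empty).insert ((0 : Nat), t0) 1) 2 := by
  refine ⟨by omega, ?_, ?_⟩
  · intro u t v h
    rw [get?_init] at h
    split_ifs at h with he
    · obtain ⟨rfl, rfl⟩ := Prod.mk.injEq .. ▸ he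
      simp only [Option.some.injEq] at h
      omega
  · intro u t u' t' v h1 h2
    rw [get?_init] at h1 h2
    split_ifs at h1 h2 with he1 he2
    · obtain ⟨rfl, rfl⟩ := Prod.mk.injEq .. ▸ he1
      obtain ⟨rfl, rfl⟩ := Prod.mk.injEq .. ▸ he2
      exact ⟨rfl, rfl⟩

theorem main_init (t0 : String) (hfree : '_' ∉ t0.toList) :
    Main ((PySem.Dict.empty).insert ((0 : Nat), t0) 1) [t0] := by
  intro ts hne hfree'
  rw [List.mem_singleton]
  constructor
  · rintro ⟨w, hw⟩
    cases ts with
    | nil => exact absurd rfl hne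
    | cons t ts' =>
      simp only [walkT] at hw
      rw [get?_init] at hw
      split_ifs at hw with he
      · have ht : t = t0 := (Prod.mk.injEq .. ▸ he).2
        cases ts' with
        | nil =>
          rw [ht, strJoin_singleton]
        | cons t' ts'' =>
          exfalso
          simp only [walkT] at hw
          rw [get?_init] at hw
          split_ifs at hw with he'
          exact absurd (Prod.mk.injEq .. ▸ he').1 (by omega)
  · intro h
    have hts : ts = [t0] := by
      apply strJoin_inj ts [t0] hne (by simp) hfree' (by simpa using hfree)
      rw [h, strJoin_singleton]
    rw [hts]
    refine ⟨1, ?_⟩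
    simp only [walkT]
    rw [get?_init, if_pos rfl]

-- ===== VERDICT (by name: the statement is the Claim_ definition above) =====
theorem lempel_zib_lib_spec : Claim_equal_lempel_zib_lib := by
  intro data _hdom hpre
  unfold Spec_lempel_zib_lib lempel_zib_lib lempel_zib_lib_alt
  simp only
  have hlen : 0 < data.length := List.length_pos_iff.mpr hpre
  have hfirst : PySem.List.pyGetD (data.map PySem.Int.toStr) 0 "" = tokP data 0 := by
    rw [PySem.List.pyGetD_zero]
    exact getD_map_toStr data 0 hlen
  have hfirstA : PySem.Int.toStr (PySem.List.pyGetD data 0 0) = tokP data 0 := by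
    unfold tokP
    rw [PySem.List.pyGetD_zero]
  rw [hfirst, hfirstA, List.length_map]
  exact main_loop data data.length data.length data.length _ 2 [tokP data 0] 1
    (by omega) (by omega) (by omega) (good_init (tokP data 0))
    (main_init (tokP data 0) (toStr_no_underscore _))
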